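-- pv_equiv track=rewrite | github.com/sipakhti/code-with-mosh-python | Lab_Excercises/Lab_11/string_permutation.py | str_permutation
-- ===== SOURCE A (Python) =====
-- def str_permutation(string: str = ...):
--     """
--     break any string into every possible substring
--     """
--     temp_list = []
--     for x in range(1,len(string)+1):
--         for y in range(len(string)):
--             temp = string[y:x]
--             if temp != "":
--                 temp_list.append(temp)
--     return sorted(temp_list, key=lambda item: len(item))
-- ===== SOURCE B (Python) =====
-- def str_permutation(string: str = ...):
--     """
--     break any string into every possible substring
--     """
--     n = len(string)
--     out = []
--     L = 1
--     while L <= n: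
--         # all substrings of length L, ascending start
--         out.extend(string[i:i + L] for i in range(n - L + 1))
--         L += 1
--     return out
-- ===== Notes on version B (the rewrite author's own statement) =====
-- stated objective: simpler
-- what changed: B recursively emits, length by length, the row of all substrings of that length (ascending start) and concatenates the rows, so it constructs the output already in A's stable-sorted order and A's empty-string filter and final comparison sort disappear.
import Mathlib
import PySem

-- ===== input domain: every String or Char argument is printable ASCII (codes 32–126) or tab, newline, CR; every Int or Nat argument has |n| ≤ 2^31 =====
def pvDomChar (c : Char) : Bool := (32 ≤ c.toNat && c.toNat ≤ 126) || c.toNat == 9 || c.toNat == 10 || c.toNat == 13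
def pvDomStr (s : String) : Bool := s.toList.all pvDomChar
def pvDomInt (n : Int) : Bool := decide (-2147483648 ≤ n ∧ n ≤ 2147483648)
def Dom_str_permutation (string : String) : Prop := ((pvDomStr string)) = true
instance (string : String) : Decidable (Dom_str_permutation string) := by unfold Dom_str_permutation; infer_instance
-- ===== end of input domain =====

-- B's single while loop emits, length by length, the row of all substrings of that
-- length (ascending start), so A's empty-string filter and final stable sort disappear
-- (objective: simpler).

-- ===== PORT A =====
-- Transliteration of A; slicing and len are done on the char list (PySem.Chars is exact
-- there), the collected substrings are turned back into Strings at the end.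
def str_permutation (string : String) : List String :=
  (PySem.List.sorted
    ((PySem.List.pyRange 1 ((string.toList.length : Int) + 1)).foldl (fun acc x =>
      (PySem.List.pyRange 0 (string.toList.length : Int)).foldl (fun acc2 y =>
        if PySem.Chars.slice string.toList (some y) (some x) ≠ [] then
          acc2 ++ [PySem.Chars.slice string.toList (some y) (some x)]
        else acc2) acc) [])
    (fun item => item.length)).map String.ofList

-- ===== PORT B =====
-- B's recursive helper rows(L): the comprehension's slice string[i:i+L] with
-- 0 ≤ i, i+L ≤ n is exactly (drop i).take L on the char list (exact there).
-- (the while loop as structural fuel recursion over its state (L, out); fuel = n bounds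
--  the iteration count, the loop exits through the explicit `L <= n` test, kept verbatim;
--  the comprehension's slice string[i:i+L] with 0 ≤ i, i+L ≤ n is exactly (drop i).take L)
def pvRowsLoop (cs : List Char) : Nat → Nat → List (List Char) → List (List Char)
  | 0, _, out => out
  | fuel + 1, L, out =>
    if cs.length < L then out
    else pvRowsLoop cs fuel (L + 1)
      (out ++ (List.range (cs.length - L + 1)).map (fun i => (cs.drop i).take L))

def str_permutation_alt (string : String) : List String :=
  (pvRowsLoop string.toList string.toList.length 1 []).map String.ofList

-- ===== PRECONDITION & SPEC =====
def Spec_str_permutation (string : String) (out : List String) : Prop := out = str_permutation_alt string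
instance (string : String) (out : List String) : Decidable (Spec_str_permutation string out) := by unfold Spec_str_permutation; infer_instance

-- ===== CLAIM (what is proved, stated in full; the proofs are below) =====
def Claim_equal_str_permutation : Prop := ∀ (string : String), Dom_str_permutation string → Spec_str_permutation string (str_permutation string)

-- ===== LEMMAS AND PROOFS =====

-- substring of length L starting at i
def pvSub (cs : List Char) (i L : Nat) : List Char := (cs.drop i).take L
-- the m substrings of length L with starts 0..m-1
def pvRow (cs : List Char) (L m : Nat) : List (List Char) := (List.range m).map (fun i => pvSub cs i L)
-- all substrings contained in cs[0:x], grouped by ascending length: the common normal form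
def pvRows (cs : List Char) (x : Nat) : List (List Char) :=
  (List.range x).flatMap (fun j => pvRow cs (j+1) (x - j))
-- row profile of the intermediate sort state: after the y longest slices ending at x+1
-- have been inserted, row j+1 holds x+1-j entries if x+1-y ≤ j, else x-j entries
def pvG (cs : List Char) (x y j : Nat) : List (List Char) :=
  pvRow cs (j+1) (if x+1-y ≤ j then x+1-j else x-j)
def pvMid (cs : List Char) (x y : Nat) : List (List Char) :=
  (List.range (x+1)).flatMap (pvG cs x y)
-- one insertion step of A's stable insertion sort (key = length)
def pvIns (S : List (List Char)) (e : List Char) : List (List Char) :=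
  PySem.List.insertBy (fun a b => decide (a.length < b.length)) e S
-- A's x-th block: the nonempty slices cs[y:x], y ascending
def pvCol (cs : List Char) (x : Nat) : List (List Char) :=
  (List.range x).map (fun y => pvSub cs y (x - y))
-- A's temp_list after the first x outer iterations
def pvTemp (cs : List Char) (x : Nat) : List (List Char) :=
  (List.range x).flatMap (fun i => pvCol cs (i+1))

lemma pvG_lt (cs : List Char) (x y j : Nat) (h : j < x+1-y) :
    pvG cs x y j = pvRow cs (j+1) (x-j) := by
  unfold pvG; rw [if_neg (by omega)]

lemma pvG_ge (cs : List Char) (x y j : Nat) (h : x+1-y ≤ j) :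
    pvG cs x y j = pvRow cs (j+1) (x+1-j) := by
  unfold pvG; rw [if_pos h]

lemma pvPyRangeOne (n : Nat) :
    PySem.List.pyRange 1 ((n : Int) + 1) = List.map (fun j : Nat => ((j : Int) + 1)) (List.range n) := by
  induction n with
  | zero => decide
  | succ n ih =>
    have h2 : ((n + 1 : Nat) : Int) + 1 = ((n : Int) + 1) + 1 := by push_cast; ring
    rw [h2, PySem.List.pyRange_one_succ_right (by omega), ih, List.range_succ, List.map_append]
    simp

lemma pvSub_length (cs : List Char) (i L : Nat) (h : i + L ≤ cs.length) :
    (pvSub cs i L).length = L := by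
  simp [pvSub]; omega

lemma pvSub_eq_nil_iff (cs : List Char) (i L : Nat) :
    pvSub cs i L = [] ↔ L = 0 ∨ cs.length ≤ i := by
  simp [pvSub, List.take_eq_nil_iff, List.drop_eq_nil_iff]

lemma pv_insertBy_append {α : Type} (before : α → α → Bool) (x : α) (u v : List α)
    (h : ∀ a ∈ u, before x a = false) :
    PySem.List.insertBy before x (u ++ v) = u ++ PySem.List.insertBy before x v := by
  induction u with
  | nil => simp
  | cons b t ih =>
    have hb : before x b = false := h b (by simp)
    simp only [List.cons_append, PySem.List.insertBy, hb, Bool.false_eq_true, if_false,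
      List.cons.injEq, true_and]
    exact ih (fun a ha => h a (by simp [ha]))

lemma pv_insertBy_all_before {α : Type} (before : α → α → Bool) (x : α) (v : List α)
    (h : ∀ a ∈ v, before x a = true) :
    PySem.List.insertBy before x v = x :: v := by
  cases v with
  | nil => simp [PySem.List.insertBy]
  | cons b t => simp [PySem.List.insertBy, h b (by simp)]

lemma pvRow_len_mem (cs : List Char) (L m : Nat) (h : m + L ≤ cs.length + 1)
    (a : List Char) (ha : a ∈ pvRow cs L m) : a.length = L := by
  simp only [pvRow, List.mem_map, List.mem_range] at ha
  obtain ⟨i, hi, rfl⟩ := ha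
  exact pvSub_length cs i L (by omega)

lemma pvRow_succ (cs : List Char) (L m : Nat) :
    pvRow cs L (m + 1) = pvRow cs L m ++ [pvSub cs m L] := by
  simp [pvRow, List.range_succ]

lemma pvMid0 (cs : List Char) (x : Nat) : pvMid cs x 0 = pvRows cs x := by
  unfold pvMid pvRows
  rw [List.range_succ, List.flatMap_append]
  have h1 : (List.range x).flatMap (pvG cs x 0)
      = (List.range x).flatMap (fun j => pvRow cs (j+1) (x - j)) := by
    apply List.flatMap_congr
    intro j hj
    rw [List.mem_range] at hj
    exact pvG_lt cs x 0 j (by omega)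
  have h2 : [x].flatMap (pvG cs x 0) = [] := by
    simp only [List.flatMap_cons, List.flatMap_nil, List.append_nil]
    rw [pvG_lt cs x 0 x (by omega)]
    simp [pvRow]
  rw [h1, h2, List.append_nil]

lemma pvMidFull (cs : List Char) (x : Nat) : pvMid cs x (x+1) = pvRows cs (x+1) := by
  unfold pvMid pvRows
  apply List.flatMap_congr
  intro j hj
  exact pvG_ge cs x (x+1) j (by omega)

lemma pvMidStep (cs : List Char) (x y : Nat) (hy : y ≤ x) (hx : x + 1 ≤ cs.length) :
    pvIns (pvMid cs x y) (pvSub cs y (x+1-y)) = pvMid cs x (y+1) := by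
  have heL : (pvSub cs y (x+1-y)).length = x+1-y := pvSub_length cs y _ (by omega)
  have hsplit : List.range (x+1)
      = List.range (x-y+1) ++ (List.range (x-(x-y))).map (fun k => (x-y+1) + k) := by
    rw [show x + 1 = (x-y+1) + (x-(x-y)) by omega, List.range_add]
  have hUlen : ∀ a ∈ (List.range (x-y+1)).flatMap (pvG cs x y), a.length ≤ x+1-y := by
    intro a ha
    rw [List.mem_flatMap] at ha
    obtain ⟨j, hj, haj⟩ := ha
    rw [List.mem_range] at hj
    rw [pvG_lt cs x y j (by omega)] at haj
    have := pvRow_len_mem cs (j+1) (x-j) (by omega) a haj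
    omega
  have hVlen : ∀ a ∈ ((List.range (x-(x-y))).map (fun k => (x-y+1) + k)).flatMap (pvG cs x y),
      x+1-y < a.length := by
    intro a ha
    rw [List.mem_flatMap] at ha
    obtain ⟨j, hj, haj⟩ := ha
    rw [List.mem_map] at hj
    obtain ⟨k, hk, rfl⟩ := hj
    rw [List.mem_range] at hk
    rw [pvG_ge cs x y _ (by omega)] at haj
    have := pvRow_len_mem cs ((x-y+1)+k+1) (x+1-((x-y+1)+k)) (by omega) a haj
    omega
  have step1 : pvIns (pvMid cs x y) (pvSub cs y (x+1-y))
      = (List.range (x-y+1)).flatMap (pvG cs x y)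
        ++ (pvSub cs y (x+1-y)
            :: ((List.range (x-(x-y))).map (fun k => (x-y+1) + k)).flatMap (pvG cs x y)) := by
    unfold pvIns pvMid
    rw [hsplit, List.flatMap_append]
    rw [pv_insertBy_append _ _ _ _ (fun a ha => by
      have := hUlen a ha
      simp only [decide_eq_false_iff_not, not_lt, heL]
      omega)]
    rw [pv_insertBy_all_before _ _ _ (fun a ha => by
      have := hVlen a ha
      simp only [decide_eq_true_eq, heL]
      omega)]
  have hV : ((List.range (x-(x-y))).map (fun k => (x-y+1) + k)).flatMap (pvG cs x (y+1))
      = ((List.range (x-(x-y))).map (fun k => (x-y+1) + k)).flatMap (pvG cs x y) := by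
    apply List.flatMap_congr
    intro j hj
    rw [List.mem_map] at hj
    obtain ⟨k, _, rfl⟩ := hj
    rw [pvG_ge cs x (y+1) _ (by omega), pvG_ge cs x y _ (by omega)]
  have hsame : (List.range (x-y)).flatMap (pvG cs x (y+1)) = (List.range (x-y)).flatMap (pvG cs x y) := by
    apply List.flatMap_congr
    intro j hj
    rw [List.mem_range] at hj
    rw [pvG_lt cs x (y+1) j (by omega), pvG_lt cs x y j (by omega)]
  have hgj0 : pvG cs x (y+1) (x-y) = pvG cs x y (x-y) ++ [pvSub cs y (x+1-y)] := by
    rw [pvG_ge cs x (y+1) (x-y) (by omega), pvG_lt cs x y (x-y) (by omega)]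
    rw [show x + 1 - (x-y) = (x - (x-y)) + 1 by omega, pvRow_succ]
    rw [show x - (x-y) = y by omega, show x - y + 1 = x + 1 - y by omega]
  rw [step1]
  unfold pvMid
  rw [hsplit, List.flatMap_append, hV, List.range_succ, List.flatMap_append, List.flatMap_append,
    hsame]
  simp only [List.flatMap_cons, List.flatMap_nil, List.append_nil, hgj0]
  simp [List.append_assoc]

lemma pvColFold (cs : List Char) (x : Nat) (hx : x + 1 ≤ cs.length) :
    ∀ y, y ≤ x + 1 →
      ((List.range y).map (fun y' => pvSub cs y' (x+1-y'))).foldl pvIns (pvRows cs x) = pvMid cs x y := by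
  intro y
  induction y with
  | zero =>
    intro _
    simpa using (pvMid0 cs x).symm
  | succ y ih =>
    intro hy
    rw [List.range_succ, List.map_append, List.foldl_append, ih (by omega)]
    simp only [List.map_cons, List.map_nil, List.foldl_cons, List.foldl_nil]
    exact pvMidStep cs x y (by omega) hx

lemma pvTempFold (cs : List Char) : ∀ x, x ≤ cs.length →
    (pvTemp cs x).foldl pvIns [] = pvRows cs x := by
  intro x
  induction x with
  | zero => intro _; simp [pvTemp, pvRows]
  | succ x ih =>
    intro hx
    unfold pvTemp
    rw [List.range_succ, List.flatMap_append, List.foldl_append]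
    have h1 : (List.range x).flatMap (fun i => pvCol cs (i+1)) = pvTemp cs x := rfl
    rw [h1, ih (by omega)]
    simp only [List.flatMap_cons, List.flatMap_nil, List.append_nil]
    have h2 : pvCol cs (x+1) = (List.range (x+1)).map (fun y => pvSub cs y (x+1-y)) := rfl
    rw [h2, pvColFold cs x (by omega) (x+1) le_rfl, pvMidFull]

lemma pvSortTemp (cs : List Char) :
    PySem.List.sorted (pvTemp cs cs.length) (fun t => t.length) false = pvRows cs cs.length := by
  rw [PySem.List.sorted_eq_foldl_insertBy]
  have h : (fun (acc : List (List Char)) (x : List Char) =>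
      PySem.List.insertBy (fun a b => decide (a.length < b.length)) x acc) = pvIns := by
    funext acc x; rfl
  rw [h]
  exact pvTempFold cs cs.length le_rfl

lemma pvAnormCore (cs : List Char) :
    (PySem.List.pyRange 1 ((cs.length : Int) + 1)).foldl (fun acc x =>
      (PySem.List.pyRange 0 (cs.length : Int)).foldl (fun acc2 y =>
        if PySem.Chars.slice cs (some y) (some x) ≠ [] then
          acc2 ++ [PySem.Chars.slice cs (some y) (some x)]
        else acc2) acc) []
    = pvTemp cs cs.length := by
  rw [pvPyRangeOne cs.length, List.foldl_map]
  have houter : ∀ (i : Nat), i ∈ List.range cs.length → ∀ (acc : List (List Char)),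
      (PySem.List.pyRange 0 (cs.length : Int)).foldl (fun acc2 y =>
        if PySem.Chars.slice cs (some y) (some ((i : Int) + 1)) ≠ [] then
          acc2 ++ [PySem.Chars.slice cs (some y) (some ((i : Int) + 1))]
        else acc2) acc
      = acc ++ pvCol cs (i+1) := by
    intro i hi acc
    rw [List.mem_range] at hi
    rw [PySem.List.pyRange_zero_natCast, List.foldl_map]
    have hbody : ∀ (y : Nat), y ∈ List.range cs.length → ∀ (acc2 : List (List Char)),
        (if PySem.Chars.slice cs (some ((y : Nat) : Int)) (some ((i : Int) + 1)) ≠ [] then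
          acc2 ++ [PySem.Chars.slice cs (some ((y : Nat) : Int)) (some ((i : Int) + 1))]
        else acc2)
        = (if pvSub cs y ((i+1)-y) ≠ [] then acc2 ++ [pvSub cs y ((i+1)-y)] else acc2) := by
      intro y _ acc2
      have hs : PySem.Chars.slice cs (some ((y : Nat) : Int)) (some ((i : Int) + 1))
          = pvSub cs y ((i+1)-y) := by
        rw [show ((i : Int) + 1) = ((i + 1 : Nat) : Int) by push_cast; ring]
        show PySem.List.slice cs (some ((y : Nat) : Int)) (some ((i + 1 : Nat) : Int)) = _
        rw [PySem.List.slice_natCast]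
        rfl
      rw [hs]
    rw [PySem.List.foldl_congr_mem' _ _ _ _ hbody]
    rw [PySem.List.foldl_append_ite (fun y => pvSub cs y ((i+1)-y) ≠ [])
      (fun y => pvSub cs y ((i+1)-y))]
    congr 1
    have hfil : (List.range cs.length).filter (fun y => decide (pvSub cs y ((i+1)-y) ≠ []))
        = List.range (i+1) := by
      have hsp : List.range cs.length
          = List.range (i+1) ++ (List.range (cs.length-(i+1))).map (fun k => (i+1) + k) := by
        have h := List.range_add (n := i+1) (m := cs.length-(i+1))
        rw [show (i+1) + (cs.length-(i+1)) = cs.length by omega] at h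
        exact h
      rw [hsp, List.filter_append]
      have h1 : (List.range (i+1)).filter (fun y => decide (pvSub cs y ((i+1)-y) ≠ []))
          = List.range (i+1) := by
        apply List.filter_eq_self.2
        intro y hy
        rw [List.mem_range] at hy
        simp only [decide_eq_true_eq, ne_eq, pvSub_eq_nil_iff, not_or]
        omega
      have h2 : ((List.range (cs.length-(i+1))).map (fun k => (i+1) + k)).filter
          (fun y => decide (pvSub cs y ((i+1)-y) ≠ [])) = [] := by
        apply List.filter_eq_nil_iff.2
        intro y hy
        rw [List.mem_map] at hy
        obtain ⟨k, _, rfl⟩ := hy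
        simp only [decide_eq_true_eq, ne_eq, not_not, pvSub_eq_nil_iff]
        left; omega
      rw [h1, h2, List.append_nil]
    rw [hfil]
    rfl
  rw [PySem.List.foldl_congr_mem' _ _ _ _ houter, PySem.List.foldl_append_eq_flatMap]
  simp only [List.nil_append]
  rfl

-- B's loop unrolled: from state (L, out) it appends the rows for lengths L, L+1, …, cs.length
lemma pvRowsLoop_eq (cs : List Char) :
    ∀ fuel L out, cs.length + 1 - L ≤ fuel →
      pvRowsLoop cs fuel L out
        = out ++ ((List.range (cs.length + 1 - L)).map (fun k => L + k)).flatMap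
            (fun m => pvRow cs m (cs.length - m + 1)) := by
  intro fuel
  induction fuel with
  | zero =>
    intro L out hL
    rw [show cs.length + 1 - L = 0 by omega]
    simp [pvRowsLoop]
  | succ fuel ih =>
    intro L out hL
    show (if cs.length < L then out
      else pvRowsLoop cs fuel (L + 1)
        (out ++ (List.range (cs.length - L + 1)).map (fun i => (cs.drop i).take L))) = _
    by_cases hc : cs.length < L
    · rw [if_pos hc, show cs.length + 1 - L = 0 by omega]
      simp
    · rw [if_neg hc, ih (L + 1) _ (by omega), List.append_assoc]
      congr 1
      conv_rhs => rw [show cs.length + 1 - L = (cs.length - L) + 1 by omega,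
        List.range_succ_eq_map, List.map_cons, List.flatMap_cons]
      congr 1
      rw [List.map_map]
      have hf : ((fun k => L + k) ∘ Nat.succ) = (fun k => (L + 1) + k) := by
        funext k; simp [Function.comp]; omega
      rw [hf, show cs.length + 1 - (L + 1) = cs.length - L by omega]

lemma pvBnormCore (cs : List Char) : pvRowsLoop cs cs.length 1 [] = pvRows cs cs.length := by
  rw [pvRowsLoop_eq cs cs.length 1 [] (by omega), show cs.length + 1 - 1 = cs.length by omega]
  rw [List.nil_append]
  unfold pvRows
  rw [List.flatMap_map]
  apply List.flatMap_congr
  intro j hj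
  rw [List.mem_range] at hj
  rw [show (1 + j) = j + 1 by omega, show cs.length - (j + 1) + 1 = cs.length - j by omega]

-- ===== VERDICT (by name: the statement is the Claim_ definition above) =====
theorem str_permutation_spec : Claim_equal_str_permutation := by
  intro string _
  unfold Spec_str_permutation str_permutation str_permutation_alt
  rw [pvAnormCore string.toList, pvSortTemp, pvBnormCore]
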